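-- pv_equiv track=rewrite | github.com/clarinsi/STARK | stark/processing/filters.py | check_root_whitelist
-- ===== SOURCE A (Python) =====
-- ROOT_WHITELIST_OPTIONS = ['deprel', 'feats', 'form', 'lemma', 'upos', 'misc']
--
-- def check_root_whitelist(form, lemma, upos, feats, deprel, misc, filters):
--     """
--     When root whitelist exists checks if element parameters are acceptable.
--     :param form:
--     :param lemma:
--     :param upos:
--     :param feats:
--     :param deprel:
--     :param filters:
--     :return:
--     """
--     if not filters['root_whitelist']:
--         return True
--
--     for option in filters['root_whitelist']:
--         filter_passed = True
--         # check if attributes are valid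
--         for key in option.keys():
--             if key not in ROOT_WHITELIST_OPTIONS:
--                 # key not in feats and not negated
--                 if key not in feats:
--                     if not option[key][0]:
--                         filter_passed = False
--                 # key different, then in head and not negated
--                 elif option[key][1] != feats[key] and not option[key][0]:
--                     filter_passed = False
--                 # key equal, and negated
--                 elif option[key][1] == feats[key] and option[key][0]:
--                     filter_passed = False
--
--         filter_passed = filter_passed and \
--             ('deprel' not in option or (option['deprel'][1] == deprel) == (not option['deprel'][0])) and \
--             ('form' not in option or (option['form'][1] == form) == (not option['form'][0])) and \
--             ('lemma' not in option or (option['lemma'][1] == lemma) == (not option['lemma'][0])) and \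
--             ('upos' not in option or (option['upos'][1] == upos) == (not option['upos'][0])) and \
--             ('misc' not in option or (option['misc'][1] == misc) == (not option['misc'][0]))
--
--         if filter_passed:
--             return True
--
--     return False
-- ===== SOURCE B (Python) =====
-- def check_root_whitelist(form, lemma, upos, feats, deprel, misc, filters):
--     options = filters['root_whitelist']
--     if not options:
--         return True
--     # one fact table for the whole node: feats overlaid by the five named attributes
--     facts = dict(feats)
--     facts.update({'deprel': deprel, 'form': form, 'lemma': lemma,
--                   'upos': upos, 'misc': misc})
--     for option in options:
--         # split the rule into positive and negative constraints ('feats' keys carry none)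
--         required = [(k, v) for k, (neg, v) in option.items() if not neg and k != 'feats']
--         forbidden = [(k, v) for k, (neg, v) in option.items() if neg and k != 'feats']
--         if all(facts.get(k) == v for k, v in required) and \
--            not any(facts.get(k) == v for k, v in forbidden):
--             return True
--     return False
-- ===== Notes on version B (the rewrite author's own statement) =====
-- stated objective: alternative
-- what changed: B builds one fact table for the node (feats overlaid with the five named attributes) and splits each whitelist rule into required and forbidden (key,value) constraint lists, passing iff every required pair holds in the facts and no forbidden pair does, instead of A's per-key branchy flag loop over non-named keys followed by a hard-coded five-way conjunction.
import Mathlib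
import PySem

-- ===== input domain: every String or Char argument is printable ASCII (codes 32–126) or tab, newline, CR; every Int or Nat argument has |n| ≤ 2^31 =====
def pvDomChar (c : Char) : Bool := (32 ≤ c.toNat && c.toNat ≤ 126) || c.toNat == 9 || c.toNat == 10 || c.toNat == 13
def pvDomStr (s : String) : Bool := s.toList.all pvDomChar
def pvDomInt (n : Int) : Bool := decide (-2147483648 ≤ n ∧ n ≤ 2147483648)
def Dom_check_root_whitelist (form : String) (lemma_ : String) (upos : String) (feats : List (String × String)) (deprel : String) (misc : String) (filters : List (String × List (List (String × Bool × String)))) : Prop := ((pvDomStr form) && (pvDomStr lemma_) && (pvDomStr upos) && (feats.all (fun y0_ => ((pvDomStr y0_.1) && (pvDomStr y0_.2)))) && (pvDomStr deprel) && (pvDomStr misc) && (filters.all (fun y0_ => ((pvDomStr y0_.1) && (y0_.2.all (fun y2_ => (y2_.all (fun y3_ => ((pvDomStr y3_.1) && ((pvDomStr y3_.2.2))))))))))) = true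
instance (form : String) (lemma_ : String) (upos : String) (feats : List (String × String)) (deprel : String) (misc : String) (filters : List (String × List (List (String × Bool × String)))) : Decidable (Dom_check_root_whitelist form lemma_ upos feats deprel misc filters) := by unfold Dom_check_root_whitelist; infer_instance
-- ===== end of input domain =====

-- B builds one merged fact table and tests each rule as required-constraints-all-hold /
-- forbidden-constraints-none-hold, replacing A's flag loop plus hard-coded five-way
-- conjunction (objective: alternative decomposition); same results on Pre_.

-- ===== PORT A =====
-- Port of A: the whitelist scan from stark/processing/filters.py, transliterated.
-- Dicts arrive as association lists; Python dict lookup/membership = PySem.Dict.get?/contains on PySem.Dict.mk.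
def ROOT_WHITELIST_OPTIONS : List String := ["deprel", "feats", "form", "lemma", "upos", "misc"]

-- one iteration of A's `for key in option.keys()` loop body (fp = filter_passed)
def aStep (feats : List (String × String)) (option : List (String × Bool × String))
    (fp : Bool) (key : String) : Bool :=
  if key ∉ ROOT_WHITELIST_OPTIONS then
    match (PySem.Dict.mk option).get? key with   -- option[key]; key comes from option.keys(), always present
    | none => fp
    | some ov =>
      if ¬ (PySem.Dict.mk feats).contains key then
        if ¬ ov.1 then false else fp
      else
        match (PySem.Dict.mk feats).get? key with   -- feats[key]; guarded by the membership test above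
        | none => fp
        | some fv =>
          if ov.2 ≠ fv ∧ ¬ ov.1 then false
          else if ov.2 = fv ∧ ov.1 then false
          else fp
  else fp

-- one conjunct of A's chained and: ('k' not in option or (option['k'][1] == attr) == (not option['k'][0]))
def aNamed (option : List (String × Bool × String)) (key attr : String) : Bool :=
  if (PySem.Dict.mk option).contains key then
    match (PySem.Dict.mk option).get? key with
    | none => true   -- unreachable: contains holds
    | some ov => (ov.2 == attr) == (!ov.1)
  else true

-- body of A's `for option in filters['root_whitelist']` iteration
def aOption (form lemma_ upos : String) (feats : List (String × String)) (deprel misc : String)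
    (option : List (String × Bool × String)) : Bool :=
  ((PySem.Dict.mk option).keys.foldl (aStep feats option) true)
    && aNamed option "deprel" deprel && aNamed option "form" form
    && aNamed option "lemma" lemma_ && aNamed option "upos" upos
    && aNamed option "misc" misc

-- A's outer loop with its early `return True`
def aLoop (form lemma_ upos : String) (feats : List (String × String)) (deprel misc : String) :
    List (List (String × Bool × String)) → Bool
  | [] => false
  | option :: rest =>
    if aOption form lemma_ upos feats deprel misc option then true
    else aLoop form lemma_ upos feats deprel misc rest

def check_root_whitelist (form : String) (lemma_ : String) (upos : String) (feats : List (String × String)) (deprel : String) (misc : String) (filters : List (String × List (List (String × Bool × String)))) : Bool :=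
  match (PySem.Dict.mk filters).get? "root_whitelist" with
  | none => false   -- Python raises KeyError here; excluded by Pre_
  | some wl =>
    if wl = [] then true
    else aLoop form lemma_ upos feats deprel misc wl

-- ===== PORT B =====
-- B: facts = dict(feats) overlaid (update = insert with overwrite) with the five named attributes.
def bFacts (form lemma_ upos deprel misc : String) (feats : List (String × String)) :
    PySem.Dict String String :=
  (((((PySem.Dict.mk feats).insert "deprel" deprel).insert "form" form).insert "lemma" lemma_).insert
      "upos" upos).insert "misc" misc

-- B: a rule passes iff all required pairs hold in facts and no forbidden pair does
def bOption (facts : PySem.Dict String String) (option : List (String × Bool × String)) : Bool :=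
  let required := option.filter (fun kv => !kv.2.1 && kv.1 != "feats")
  let forbidden := option.filter (fun kv => kv.2.1 && kv.1 != "feats")
  (required.all (fun kv => facts.get? kv.1 == some kv.2.2)) &&
  !(forbidden.any (fun kv => facts.get? kv.1 == some kv.2.2))

def check_root_whitelist_alt (form : String) (lemma_ : String) (upos : String) (feats : List (String × String)) (deprel : String) (misc : String) (filters : List (String × List (List (String × Bool × String)))) : Bool :=
  match (PySem.Dict.mk filters).get? "root_whitelist" with
  | none => false   -- Python raises KeyError here; excluded by Pre_
  | some wl =>
    if wl = [] then true
    else wl.any (bOption (bFacts form lemma_ upos deprel misc feats))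

-- ===== PRECONDITION & SPEC =====
-- Pre_ excludes (a) inputs where A raises KeyError ('root_whitelist' not a key of filters) and
-- (b) option association lists with duplicate keys, which represent no Python dict (a dict cannot
-- hold a key twice), so first-match lookup order there is an artefact of the encoding.
def Pre_check_root_whitelist (form : String) (lemma_ : String) (upos : String) (feats : List (String × String)) (deprel : String) (misc : String) (filters : List (String × List (List (String × Bool × String)))) : Prop :=
  "root_whitelist" ∈ filters.map Prod.fst ∧
  ∀ p ∈ filters, ∀ option ∈ p.2, (option.map Prod.fst).Nodup
instance (form : String) (lemma_ : String) (upos : String) (feats : List (String × String)) (deprel : String) (misc : String) (filters : List (String × List (List (String × Bool × String)))) : Decidable (Pre_check_root_whitelist form lemma_ upos feats deprel misc filters) := by unfold Pre_check_root_whitelist; infer_instance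

def pvWitness_check_root_whitelist : String × String × String × (List (String × String)) × String × String × (List (String × List (List (String × Bool × String)))) :=
  ("dog", "dog", "NOUN", [("Case", "Nom")], "root", "_",
   [("root_whitelist", [[("upos", (false, "NOUN")), ("Case", (true, "Acc"))]])])

def Spec_check_root_whitelist (form : String) (lemma_ : String) (upos : String) (feats : List (String × String)) (deprel : String) (misc : String) (filters : List (String × List (List (String × Bool × String)))) (out : Bool) : Prop := out = check_root_whitelist_alt form lemma_ upos feats deprel misc filters
instance (form : String) (lemma_ : String) (upos : String) (feats : List (String × String)) (deprel : String) (misc : String) (filters : List (String × List (List (String × Bool × String)))) (out : Bool) : Decidable (Spec_check_root_whitelist form lemma_ upos feats deprel misc filters out) := by unfold Spec_check_root_whitelist; infer_instance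

-- ===== CLAIM (what is proved, stated in full; the proofs are below) =====
def Claim_equal_check_root_whitelist : Prop := ∀ (form : String) (lemma_ : String) (upos : String) (feats : List (String × String)) (deprel : String) (misc : String) (filters : List (String × List (List (String × Bool × String)))), Dom_check_root_whitelist form lemma_ upos feats deprel misc filters → Pre_check_root_whitelist form lemma_ upos feats deprel misc filters → Spec_check_root_whitelist form lemma_ upos feats deprel misc filters (check_root_whitelist form lemma_ upos feats deprel misc filters)

-- ===== LEMMAS AND PROOFS =====

-- proof-side per-key predicate equivalent to B's required/forbidden split
def pKey (facts : PySem.Dict String String) (kv : String × Bool × String) : Bool :=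
  (kv.1 == "feats") || ((facts.get? kv.1 == some kv.2.2) == !kv.2.1)

-- B's per-rule test recombined into a single all over the rule's items
theorem bOption_all (facts : PySem.Dict String String) (option : List (String × Bool × String)) :
    bOption facts option = option.all (pKey facts) := by
  induction option with
  | nil => rfl
  | cons kv rest ih =>
    simp only [bOption, List.filter_cons, List.all_cons] at *
    by_cases hf : kv.1 = "feats" <;> cases hneg : kv.2.1 <;>
      simp_all [pKey, Bool.and_assoc, Bool.or_assoc] <;>
      cases hm : (facts.get? kv.1 == some kv.2.2) <;> simp_all
  
-- lookups into B's fact table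
theorem facts_named (form lemma_ upos deprel misc : String) (feats : List (String × String)) :
    (bFacts form lemma_ upos deprel misc feats).get? "deprel" = some deprel ∧
    (bFacts form lemma_ upos deprel misc feats).get? "form" = some form ∧
    (bFacts form lemma_ upos deprel misc feats).get? "lemma" = some lemma_ ∧
    (bFacts form lemma_ upos deprel misc feats).get? "upos" = some upos ∧
    (bFacts form lemma_ upos deprel misc feats).get? "misc" = some misc := by
  unfold bFacts
  refine ⟨?_, ?_, ?_, ?_, ?_⟩ <;>
    simp [PySem.Dict.get?_insert]

theorem facts_other (form lemma_ upos deprel misc : String) (feats : List (String × String))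
    (k : String) (h1 : k ≠ "deprel") (h2 : k ≠ "form") (h3 : k ≠ "lemma") (h4 : k ≠ "upos")
    (h5 : k ≠ "misc") :
    (bFacts form lemma_ upos deprel misc feats).get? k = (PySem.Dict.mk feats).get? k := by
  unfold bFacts
  simp [PySem.Dict.get?_insert, h1, h2, h3, h4, h5]

-- get? on a raw association list, characterised
theorem pv_get?_none {α : Type} (d : List (String × α)) (k : String) :
    (PySem.Dict.mk d).get? k = none ↔ k ∉ d.map Prod.fst := by
  induction d with
  | nil => simp [PySem.Dict.get?]
  | cons p rest ih =>
    rw [show p = (p.1, p.2) from rfl, PySem.Dict.get?_mk_cons]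
    by_cases h : p.1 = k
    · subst h; simp
    · have hne : ¬ (p.1 == k) := by simpa [beq_iff_eq] using h
      simp [hne, ih]
      exact fun _ hk => h hk.symm

theorem pv_get?_of_mem {α : Type} {d : List (String × α)} {k : String} {v : α}
    (hnd : (d.map Prod.fst).Nodup) (h : (k, v) ∈ d) :
    (PySem.Dict.mk d).get? k = some v := by
  induction d with
  | nil => simp at h
  | cons p rest ih =>
    rw [show p = (p.1, p.2) from rfl, PySem.Dict.get?_mk_cons]
    simp only [List.map_cons, List.nodup_cons] at hnd
    rcases List.mem_cons.mp h with h | h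
    · rw [← h]; simp
    · have hk : k ∈ rest.map Prod.fst := List.mem_map.mpr ⟨(k, v), h, rfl⟩
      have hne : ¬ (p.1 == k) := by
        simp only [beq_iff_eq]; rintro rfl; exact hnd.1 hk
      simp [hne, ih hnd.2 h]

theorem pv_mem_of_get? {α : Type} {d : List (String × α)} {k : String} {v : α}
    (h : (PySem.Dict.mk d).get? k = some v) : (k, v) ∈ d := by
  induction d with
  | nil => simp [PySem.Dict.get?] at h
  | cons p rest ih =>
    rw [show p = (p.1, p.2) from rfl, PySem.Dict.get?_mk_cons] at h
    by_cases he : p.1 == k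
    · have hpk : p.1 = k := by simpa [beq_iff_eq] using he
      simp only [he, if_true, Option.some.injEq] at h
      have hp : p = (k, v) := by rw [Prod.ext_iff]; exact ⟨hpk, h⟩
      rw [hp]; exact List.mem_cons_self
    · simp [he] at h
      exact List.mem_cons_of_mem _ (ih h)

theorem pv_contains_iff {α : Type} (d : List (String × α)) (k : String) :
    (PySem.Dict.mk d).contains k = true ↔ k ∈ d.map Prod.fst := by
  rw [PySem.Dict.contains_mk]
  simp [List.any_eq_true, List.mem_map, beq_iff_eq]

-- A's inner loop factors through a per-key test
theorem aStep_factor (feats : List (String × String)) (option : List (String × Bool × String))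
    (fp : Bool) (key : String) :
    aStep feats option fp key = (aStep feats option true key && fp) := by
  unfold aStep
  cases (PySem.Dict.mk option).get? key with
  | none => split_ifs <;> simp
  | some ov =>
    cases (PySem.Dict.mk feats).get? key with
    | none => split_ifs <;> simp
    | some fv => split_ifs <;> simp_all [Bool.and_assoc]

theorem foldl_aStep (feats : List (String × String)) (option : List (String × Bool × String)) :
    ∀ (keys : List String) (fp : Bool),
      keys.foldl (aStep feats option) fp = (fp && keys.all (aStep feats option true)) := by
  intro keys
  induction keys with
  | nil => intro fp; simp
  | cons k ks ih =>
    intro fp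
    rw [List.foldl_cons, ih, aStep_factor, List.all_cons]
    cases fp <;> simp

-- per-key bridge for keys outside ROOT_WHITELIST_OPTIONS
theorem key_bridge (form lemma_ upos deprel misc : String) (feats : List (String × String))
    (option : List (String × Bool × String)) (key : String) (ov : Bool × String)
    (hno : key ∉ ROOT_WHITELIST_OPTIONS)
    (hget : (PySem.Dict.mk option).get? key = some ov) :
    aStep feats option true key
      = pKey (bFacts form lemma_ upos deprel misc feats) (key, ov) := by
  simp only [ROOT_WHITELIST_OPTIONS, List.mem_cons, List.mem_singleton, not_or] at hno
  obtain ⟨h1, h6, h2, h3, h4, h5, -⟩ := hno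
  unfold aStep pKey
  rw [if_pos (by simp [ROOT_WHITELIST_OPTIONS, h1, h2, h3, h4, h5, h6]), hget]
  simp only []
  rw [facts_other form lemma_ upos deprel misc feats key h1 h2 h3 h4 h5]
  cases hf : (PySem.Dict.mk feats).get? key with
  | none =>
    have hc : ¬ (PySem.Dict.mk feats).contains key = true := by
      rw [pv_contains_iff]; exact (pv_get?_none feats key).mp hf
    simp only [hc, not_false_iff]
    have hkf : ¬ (key == "feats") := by simpa [beq_iff_eq] using h6
    cases ov.1 <;> simp [hkf]
  | some fv =>
    have hc : (PySem.Dict.mk feats).contains key = true := by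
      rw [pv_contains_iff]
      exact List.mem_map.mpr ⟨(key, fv), pv_mem_of_get? hf, rfl⟩
    simp only [hc, not_true, if_false]
    have hkf : ¬ (key == "feats") := by simpa [beq_iff_eq] using h6
    by_cases he : ov.2 = fv
    · cases h : ov.1 <;> simp [he, hkf]
    · cases h : ov.1 <;> simp [he, hkf, Ne.symm he]

-- per-key bridge for the five named keys
theorem named_bridge (facts : PySem.Dict String String)
    (option : List (String × Bool × String)) (key attr : String) (ov : Bool × String)
    (hkf : key ≠ "feats") (hattr : facts.get? key = some attr)
    (hget : (PySem.Dict.mk option).get? key = some ov) :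
    aNamed option key attr = pKey facts (key, ov) := by
  have hc : (PySem.Dict.mk option).contains key = true := by
    rw [pv_contains_iff]
    exact List.mem_map.mpr ⟨(key, ov), pv_mem_of_get? hget, rfl⟩
  unfold aNamed pKey
  rw [if_pos hc, hget]
  simp only []
  rw [hattr]
  have hkf' : ¬ (key == "feats") := by simpa [beq_iff_eq] using hkf
  cases h : ov.1 <;> simp [hkf', beq_iff_eq, @eq_comm String attr ov.2]

theorem named_absent (option : List (String × Bool × String)) (key attr : String)
    (hget : (PySem.Dict.mk option).get? key = none) :
    aNamed option key attr = true := by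
  have hc : ¬ (PySem.Dict.mk option).contains key = true := by
    rw [pv_contains_iff]; exact (pv_get?_none option key).mp hget
  unfold aNamed
  rw [if_neg hc]

-- the per-option equivalence (needs nodup keys)
theorem option_eq (form lemma_ upos : String) (feats : List (String × String)) (deprel misc : String)
    (option : List (String × Bool × String)) (hnd : (option.map Prod.fst).Nodup) :
    aOption form lemma_ upos feats deprel misc option
      = bOption (bFacts form lemma_ upos deprel misc feats) option := by
  obtain ⟨hfd, hffo, hfl, hfu, hfm⟩ := facts_named form lemma_ upos deprel misc feats
  rw [bOption_all, Bool.eq_iff_iff]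
  unfold aOption
  rw [foldl_aStep]
  simp only [Bool.true_and, Bool.and_eq_true, List.all_eq_true]
  constructor
  · rintro ⟨⟨⟨⟨⟨hkeys, hdep⟩, hform⟩, hlem⟩, hupos⟩, hmisc⟩ kv hkv
    have hget : (PySem.Dict.mk option).get? kv.1 = some kv.2 :=
      pv_get?_of_mem hnd (by simpa using hkv)
    by_cases h6 : kv.1 = "feats"
    · simp [pKey, h6]
    by_cases h1 : kv.1 = "deprel"
    · rw [show kv = (kv.1, kv.2) from rfl, ← named_bridge _ option kv.1 deprel kv.2 (h1 ▸ (by decide))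
        (by rw [h1]; exact hfd) hget, h1]
      exact hdep
    by_cases h2 : kv.1 = "form"
    · rw [show kv = (kv.1, kv.2) from rfl, ← named_bridge _ option kv.1 form kv.2 (h2 ▸ (by decide))
        (by rw [h2]; exact hffo) hget, h2]
      exact hform
    by_cases h3 : kv.1 = "lemma"
    · rw [show kv = (kv.1, kv.2) from rfl, ← named_bridge _ option kv.1 lemma_ kv.2 (h3 ▸ (by decide))
        (by rw [h3]; exact hfl) hget, h3]
      exact hlem
    by_cases h4 : kv.1 = "upos"
    · rw [show kv = (kv.1, kv.2) from rfl, ← named_bridge _ option kv.1 upos kv.2 (h4 ▸ (by decide))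
        (by rw [h4]; exact hfu) hget, h4]
      exact hupos
    by_cases h5 : kv.1 = "misc"
    · rw [show kv = (kv.1, kv.2) from rfl, ← named_bridge _ option kv.1 misc kv.2 (h5 ▸ (by decide))
        (by rw [h5]; exact hfm) hget, h5]
      exact hmisc
    have hroot : kv.1 ∉ ROOT_WHITELIST_OPTIONS := by
      simp [ROOT_WHITELIST_OPTIONS, h1, h2, h3, h4, h5, h6]
    rw [show kv = (kv.1, kv.2) from rfl,
      ← key_bridge form lemma_ upos deprel misc feats option kv.1 kv.2 hroot hget]
    refine hkeys kv.1 ?_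
    simp only [PySem.Dict.keys]
    exact List.mem_map.mpr ⟨kv, hkv, rfl⟩
  · intro h
    refine ⟨⟨⟨⟨⟨?_, ?_⟩, ?_⟩, ?_⟩, ?_⟩, ?_⟩
    · intro k hk
      simp only [PySem.Dict.keys] at hk
      obtain ⟨kv, hkv, rfl⟩ := List.mem_map.mp hk
      by_cases hroot : kv.1 ∈ ROOT_WHITELIST_OPTIONS
      · unfold aStep
        rw [if_neg (not_not_intro hroot)]
      · have hget : (PySem.Dict.mk option).get? kv.1 = some kv.2 :=
          pv_get?_of_mem hnd (by simpa using hkv)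
        rw [key_bridge form lemma_ upos deprel misc feats option kv.1 kv.2 hroot hget]
        exact h kv hkv
    · cases hg : (PySem.Dict.mk option).get? "deprel" with
      | none => exact named_absent option "deprel" deprel hg
      | some ov =>
        rw [named_bridge _ option "deprel" deprel ov (by decide) hfd hg]
        exact h ("deprel", ov) (pv_mem_of_get? hg)
    · cases hg : (PySem.Dict.mk option).get? "form" with
      | none => exact named_absent option "form" form hg
      | some ov =>
        rw [named_bridge _ option "form" form ov (by decide) hffo hg]
        exact h ("form", ov) (pv_mem_of_get? hg)
    · cases hg : (PySem.Dict.mk option).get? "lemma" with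
      | none => exact named_absent option "lemma" lemma_ hg
      | some ov =>
        rw [named_bridge _ option "lemma" lemma_ ov (by decide) hfl hg]
        exact h ("lemma", ov) (pv_mem_of_get? hg)
    · cases hg : (PySem.Dict.mk option).get? "upos" with
      | none => exact named_absent option "upos" upos hg
      | some ov =>
        rw [named_bridge _ option "upos" upos ov (by decide) hfu hg]
        exact h ("upos", ov) (pv_mem_of_get? hg)
    · cases hg : (PySem.Dict.mk option).get? "misc" with
      | none => exact named_absent option "misc" misc hg
      | some ov =>
        rw [named_bridge _ option "misc" misc ov (by decide) hfm hg]
        exact h ("misc", ov) (pv_mem_of_get? hg)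

theorem loop_eq (form lemma_ upos : String) (feats : List (String × String)) (deprel misc : String)
    (wl : List (List (String × Bool × String))) (hnd : ∀ o ∈ wl, (o.map Prod.fst).Nodup) :
    aLoop form lemma_ upos feats deprel misc wl
      = wl.any (bOption (bFacts form lemma_ upos deprel misc feats)) := by
  induction wl with
  | nil => simp [aLoop]
  | cons o rest ih =>
    unfold aLoop
    rw [option_eq form lemma_ upos feats deprel misc o (hnd o (List.mem_cons_self))]
    cases ho : bOption (bFacts form lemma_ upos deprel misc feats) o <;>
      simp [ho, ih (fun x hx => hnd x (List.mem_cons_of_mem _ hx)), List.any_cons]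

-- ===== VERDICT (by name: the statement is the Claim_ definition above) =====
theorem check_root_whitelist_spec : Claim_equal_check_root_whitelist := by
  intro form lemma_ upos feats deprel misc filters _hdom hpre
  unfold Spec_check_root_whitelist check_root_whitelist check_root_whitelist_alt
  obtain ⟨hk, hnd⟩ := hpre
  cases hwl : (PySem.Dict.mk filters).get? "root_whitelist" with
  | none => exact absurd ((pv_get?_none filters "root_whitelist").mp hwl) (by simpa using hk)
  | some wl =>
    by_cases hempty : wl = []
    · simp [hempty]
    · simp only [hempty]
      exact loop_eq _ _ _ _ _ _ wl (hnd _ (pv_mem_of_get? hwl))
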